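-- pv_equiv track=rewrite | github.com/Lewis0770/reorganization | code/Crystal_d3/d3_interactive.py | get_unique_atoms
-- ===== SOURCE A (Python) =====
-- from typing import Dict, List, Optional, Tuple, Any, Union
--
-- def get_unique_atoms(atoms: List[str]) -> List[Tuple[str, int]]:
--     """Get unique atoms and their first occurrence index."""
--     seen = {}
--     result = []
--     for i, atom in enumerate(atoms):
--         if atom not in seen:
--             seen[atom] = i
--             result.append((atom, i))
--     return result
-- ===== SOURCE B (Python) =====
-- from typing import List, Tuple
--
-- def get_unique_atoms(atoms: List[str]) -> List[Tuple[str, int]]: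
--     """Get unique atoms and their first occurrence index."""
--     return sorted(((a, atoms.index(a)) for a in set(atoms)), key=lambda t: t[1])
-- ===== Notes on version B (the rewrite author's own statement) =====
-- stated objective: alternative
-- what changed: Instead of a single first-seen scan that appends to a parallel result list, B builds the unordered set of atoms, looks up each distinct atom's first index with list.index, and recovers first-occurrence order by sorting the pairs by index.
import Mathlib
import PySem

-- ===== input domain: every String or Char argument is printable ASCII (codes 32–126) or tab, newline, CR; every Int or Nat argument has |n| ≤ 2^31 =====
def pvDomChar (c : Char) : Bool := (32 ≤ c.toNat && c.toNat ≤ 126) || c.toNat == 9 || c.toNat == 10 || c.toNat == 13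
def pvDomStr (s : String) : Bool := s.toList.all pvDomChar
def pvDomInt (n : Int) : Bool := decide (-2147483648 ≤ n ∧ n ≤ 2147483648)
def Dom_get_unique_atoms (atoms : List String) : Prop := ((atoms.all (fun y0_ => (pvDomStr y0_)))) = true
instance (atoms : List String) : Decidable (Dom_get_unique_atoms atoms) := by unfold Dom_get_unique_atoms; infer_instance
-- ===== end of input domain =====

-- B replaces A's single first-seen scan by: build the set of atoms, pair each distinct atom with its list.index, and sort the pairs by index (alternative algorithm; no speed claimed).


-- ===== PORT A =====
def get_unique_atoms (atoms : List String) : List (String × Int) :=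
  ((PySem.List.enumerate atoms).foldl
    (fun (st : PySem.Dict String Int × List (String × Int)) p =>
      if !st.1.contains p.2 then (st.1.insert p.2 p.1, st.2 ++ [(p.2, p.1)])
      else st)
    (PySem.Dict.empty, [])).2

-- ===== PORT B =====
-- B: set(atoms), each distinct atom paired with atoms.index(a), sorted by index.
-- atoms.index(a) never raises here since a ∈ atoms; .getD 0 is the unreachable none branch.
def get_unique_atoms_alt (atoms : List String) : List (String × Int) :=
  PySem.List.sorted
    ((PySem.Set.ofList atoms).map
      (fun a => (a, ((PySem.List.index? atoms a).getD 0 : Int))))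
    (fun t => t.2) false

-- ===== PRECONDITION & SPEC =====
def Spec_get_unique_atoms (atoms : List String) (out : List (String × Int)) : Prop := out = get_unique_atoms_alt atoms
instance (atoms : List String) (out : List (String × Int)) : Decidable (Spec_get_unique_atoms atoms out) := by unfold Spec_get_unique_atoms; infer_instance

-- ===== CLAIM (what is proved, stated in full; the proofs are below) =====
def Claim_equal_get_unique_atoms : Prop := ∀ (atoms : List String), Dom_get_unique_atoms atoms → Spec_get_unique_atoms atoms (get_unique_atoms atoms)

-- ===== LEMMAS AND PROOFS =====

-- Characterisation of A's fold, by induction on the list from the right: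
-- the dict holds exactly the members of the processed list, and the result is the
-- first-occurrence map over set(l), whose indices are strictly increasing.
theorem uq_char (l : List String) :
    (∀ a, (((PySem.List.enumerate l).foldl
        (fun (st : PySem.Dict String Int × List (String × Int)) p =>
          if !st.1.contains p.2 then (st.1.insert p.2 p.1, st.2 ++ [(p.2, p.1)])
          else st)
        (PySem.Dict.empty, [])).1).contains a = l.contains a)
    ∧ (((PySem.List.enumerate l).foldl
        (fun (st : PySem.Dict String Int × List (String × Int)) p =>
          if !st.1.contains p.2 then (st.1.insert p.2 p.1, st.2 ++ [(p.2, p.1)])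
          else st)
        (PySem.Dict.empty, [])).2
      = (PySem.Set.ofList l).map
          (fun a => (a, ((PySem.List.index? l a).getD 0 : Int)))) := by
  induction l using List.reverseRecOn with
  | nil => simp [PySem.List.enumerate_nil]
  | append_singleton l x ih =>
    obtain ⟨ih1, ih2⟩ := ih
    rw [PySem.List.enumerate_append, List.foldl_append]
    simp only [PySem.List.enumerate_cons, PySem.List.enumerate_nil, List.foldl_cons,
      List.foldl_nil]
    by_cases hx : l.contains x = true
    · have hc : (((PySem.List.enumerate l).foldl
        (fun (st : PySem.Dict String Int × List (String × Int)) p =>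
          if !st.1.contains p.2 then (st.1.insert p.2 p.1, st.2 ++ [(p.2, p.1)])
          else st)
        (PySem.Dict.empty, [])).1).contains x = true := by rw [ih1]; exact hx
      simp only [hc, Bool.not_true, Bool.false_eq_true, if_false]
      refine ⟨?_, ?_⟩
      · intro a
        rw [ih1]
        simp only [List.contains_append, List.contains_cons, List.contains_nil, Bool.or_false]
        cases hax : (a == x) with
        | false => simp
        | true =>
          have : a = x := eq_of_beq hax
          subst this
          simpa using hx
      · rw [ih2]
        have hxl : x ∈ l := by simpa using hx
        rw [PySem.Set.ofList_append_singleton]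
        have hadd : PySem.Set.add (PySem.Set.ofList l) x = PySem.Set.ofList l := by
          simp [PySem.Set.add, hxl]
        rw [hadd]
        refine List.map_congr_left (fun a ha => ?_)
        have : a ∈ l := (PySem.List.mem_dedup l a).mp ha
        rw [PySem.List.index?_append_of_mem _ this]
    · have hx' : l.contains x = false := by simpa using hx
      have hc : (((PySem.List.enumerate l).foldl
        (fun (st : PySem.Dict String Int × List (String × Int)) p =>
          if !st.1.contains p.2 then (st.1.insert p.2 p.1, st.2 ++ [(p.2, p.1)])
          else st)
        (PySem.Dict.empty, [])).1).contains x = false := by rw [ih1]; exact hx'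
      simp only [hc, Bool.not_false, if_true]
      have hnot : x ∉ l := fun h => by simp [h] at hx'
      refine ⟨?_, ?_⟩
      · intro a
        rw [PySem.Dict.contains_insert, ih1]
        simp only [List.contains_append, List.contains_cons, List.contains_nil, Bool.or_false]
        cases hax : (a == x) <;> simp [Bool.or_comm]
      · rw [ih2]
        rw [PySem.Set.ofList_append_singleton]
        have hadd : PySem.Set.add (PySem.Set.ofList l) x = PySem.Set.ofList l ++ [x] := by
          simp [PySem.Set.add, hnot]
        rw [hadd, List.map_append]
        have h1 : ∀ a ∈ PySem.Set.ofList l,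
            (fun a => (a, ((PySem.List.index? (l ++ [x]) a).getD 0 : Int))) a
            = (fun a => (a, ((PySem.List.index? l a).getD 0 : Int))) a := by
          intro a ha
          have : a ∈ l := (PySem.List.mem_dedup l a).mp ha
          simp only
          rw [PySem.List.index?_append_of_mem _ this]
        rw [List.map_congr_left h1]
        have h2 : PySem.List.index? (l ++ [x]) x = some l.length :=
          PySem.List.index?_append_singleton_self l x hnot
        rw [PySem.List.index?_eq_idxOf?] at h2
        simp [h2]

-- The first-occurrence index of a member is below the list's length.
theorem uq_idx_lt (l : List String) (a : String) (h : a ∈ l) :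
    (PySem.List.index? l a).getD 0 < l.length := by
  obtain ⟨k, hk⟩ := Option.isSome_iff_exists.mp ((PySem.List.index?_isSome_iff l a).mpr h)
  obtain ⟨hlt, -⟩ := PySem.List.getElem_of_index?_eq_some hk
  rw [hk]
  simpa using hlt

-- set(l) lists the distinct atoms in first-occurrence order, so the index column is
-- already non-decreasing and B's sort leaves the list unchanged.
theorem uq_pairwise (l : List String) :
    ((PySem.Set.ofList l).map
      (fun a => (a, ((PySem.List.index? l a).getD 0 : Int)))).Pairwise
      (fun p q => p.2 ≤ q.2) := by
  induction l using List.reverseRecOn with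
  | nil => simp
  | append_singleton l x ih =>
    by_cases hx : x ∈ l
    · rw [PySem.Set.ofList_append_singleton]
      have hadd : PySem.Set.add (PySem.Set.ofList l) x = PySem.Set.ofList l := by
        simp [PySem.Set.add, hx]
      rw [hadd]
      have h1 : ∀ a ∈ PySem.Set.ofList l,
          (fun a => (a, ((PySem.List.index? (l ++ [x]) a).getD 0 : Int))) a
          = (fun a => (a, ((PySem.List.index? l a).getD 0 : Int))) a := by
        intro a ha
        have : a ∈ l := (PySem.List.mem_dedup l a).mp ha
        simp only
        rw [PySem.List.index?_append_of_mem _ this]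
      rw [List.map_congr_left h1]
      exact ih
    · rw [PySem.Set.ofList_append_singleton]
      have hadd : PySem.Set.add (PySem.Set.ofList l) x = PySem.Set.ofList l ++ [x] := by
        simp [PySem.Set.add, hx]
      rw [hadd, List.map_append]
      have h1 : ∀ a ∈ PySem.Set.ofList l,
          (fun a => (a, ((PySem.List.index? (l ++ [x]) a).getD 0 : Int))) a
          = (fun a => (a, ((PySem.List.index? l a).getD 0 : Int))) a := by
        intro a ha
        have : a ∈ l := (PySem.List.mem_dedup l a).mp ha
        simp only
        rw [PySem.List.index?_append_of_mem _ this]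
      rw [List.map_congr_left h1]
      refine List.pairwise_append.mpr ⟨ih, by simp, ?_⟩
      intro p hp q hq
      simp only [List.map_cons, List.map_nil, List.mem_cons, List.not_mem_nil, or_false] at hq
      obtain ⟨a, ha, rfl⟩ := List.mem_map.mp hp
      subst hq
      have hal : a ∈ l := (PySem.List.mem_dedup l a).mp ha
      have hlt := uq_idx_lt l a hal
      have h2 : PySem.List.index? (l ++ [x]) x = some l.length :=
        PySem.List.index?_append_singleton_self l x hx
      simp only [h2, Option.getD_some]
      exact_mod_cast Nat.le_of_lt hlt

-- ===== VERDICT (by name: the statement is the Claim_ definition above) =====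
theorem get_unique_atoms_spec : Claim_equal_get_unique_atoms := by
  intro atoms _
  unfold Spec_get_unique_atoms get_unique_atoms get_unique_atoms_alt
  exact ((uq_char atoms).2).trans
    (PySem.List.sorted_eq_self_of_pairwise _ _ (uq_pairwise atoms)).symm
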